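-- pv_equiv track=rewrite | github.com/dmiyakawa/atcoder-workspace | abc268/F/main.py | count
-- ===== SOURCE A (Python) =====
-- def count(s):
--     ret = 0
--     x = 0
--     for ch in s:
--         if ch == "X":
--             x += 1
--         else:
--             ret += x * int(ch)
--     return ret
-- ===== SOURCE B (Python) =====
-- def count(s):
--     ret = 0
--     suf = 0
--     for ch in reversed(s):
--         if ch == "X":
--             ret += suf
--         else:
--             suf += int(ch)
--     return ret
-- ===== Notes on version B (the rewrite author's own statement) =====
-- stated objective: alternative
-- what changed: B scans the string right-to-left maintaining a running suffix sum of digit values and adds it at each 'X', instead of A's left-to-right pass counting preceding X's and weighting each digit.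
import Mathlib
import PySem

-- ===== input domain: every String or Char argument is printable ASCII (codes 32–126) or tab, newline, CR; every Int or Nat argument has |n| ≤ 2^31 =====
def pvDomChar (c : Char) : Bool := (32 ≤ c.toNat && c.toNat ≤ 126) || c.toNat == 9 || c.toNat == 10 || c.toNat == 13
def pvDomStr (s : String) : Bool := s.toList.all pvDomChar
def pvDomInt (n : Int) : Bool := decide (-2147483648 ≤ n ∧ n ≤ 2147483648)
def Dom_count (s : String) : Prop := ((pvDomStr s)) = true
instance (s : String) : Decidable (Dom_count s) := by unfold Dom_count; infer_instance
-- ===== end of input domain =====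

-- B traverses right-to-left keeping a running suffix sum of digit values, adding it at each 'X';
-- same O(n) cost, a different quantity maintained (objective: alternative).

-- int(ch) for a single character, as both Pythons call it; total via getD, but Pre_count
-- restricts to characters where int(ch) succeeds, so the default is never reached there.
def pvIntOfChar (c : Char) : Int := (PySem.Int.ofChars? [c]).getD 0

-- ===== PORT A =====
def countLoopA (l : List Char) (st : Int × Int) : Int × Int :=
  l.foldl (fun (st : Int × Int) ch =>
    if ch = 'X' then (st.1, st.2 + 1) else (st.1 + st.2 * pvIntOfChar ch, st.2)) st

def count (s : String) : Int := (countLoopA s.toList (0, 0)).1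

-- ===== PORT B =====
-- reversed(s) with a left fold = a right fold over the characters; state (ret, suf)
def countLoopB (l : List Char) : Int × Int :=
  l.foldr (fun ch (st : Int × Int) =>
    if ch = 'X' then (st.1 + st.2, st.2) else (st.1, st.2 + pvIntOfChar ch)) (0, 0)

def count_alt (s : String) : Int := (countLoopB s.toList).1

-- ===== PRECONDITION & SPEC =====
-- Pre_ excludes exactly the inputs on which A raises ValueError: any character that is
-- neither 'X' nor a single character accepted by int(ch) (B raises there too).
def Pre_count (s : String) : Prop :=
  (s.toList.all (fun c => c == 'X' || c.isDigit)) = true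
instance (s : String) : Decidable (Pre_count s) := by unfold Pre_count; infer_instance
def pvWitness_count : String := "3X1X2"

def Spec_count (s : String) (out : Int) : Prop := out = count_alt s
instance (s : String) (out : Int) : Decidable (Spec_count s out) := by unfold Spec_count; infer_instance

-- ===== CLAIM (what is proved, stated in full; the proofs are below) =====
def Claim_equal_count : Prop := ∀ (s : String), Dom_count s → Pre_count s → Spec_count s (count s)

-- ===== LEMMAS AND PROOFS =====

-- Invariant relating A's left fold to B's right fold: B's second component is the digit
-- sum of the suffix, and A's loop from (r, x) lands at r + x * digsum + B's cross sum.
theorem countLoop_inv (l : List Char) (r x : Int) :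
    (countLoopA l (r, x)).1 = r + x * (countLoopB l).2 + (countLoopB l).1 := by
  induction l generalizing r x with
  | nil => simp [countLoopA, countLoopB]
  | cons c t ih =>
    have stepA : countLoopA (c :: t) (r, x)
        = countLoopA t (if c = 'X' then (r, x + 1) else (r + x * pvIntOfChar c, x)) := rfl
    have stepB : countLoopB (c :: t)
        = (if c = 'X' then ((countLoopB t).1 + (countLoopB t).2, (countLoopB t).2)
           else ((countLoopB t).1, (countLoopB t).2 + pvIntOfChar c)) := rfl
    rw [stepA, stepB]
    split_ifs with h
    · rw [ih]; ring
    · rw [ih]; ring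

-- ===== VERDICT (by name: the statement is the Claim_ definition above) =====
theorem count_spec : Claim_equal_count := by
  intro s _ _
  show count s = count_alt s
  simp [count, count_alt, countLoop_inv]
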